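-- pv_equiv track=rewrite | github.com/thewheat/brunei-car-prices | 4convertToCSV.py | fixBadCostData
-- ===== SOURCE A (Python) =====
-- def fixBadCostData(partsArr, date):
--     str = " ".join(partsArr)
--     if date in [[24, 11, 2022], [19, 1, 2023]] and "MERCEDES BENZ C300" in str:
--        for i,part in enumerate(partsArr):
--           if '939,433.00' in part:
--              partsArr[i] = "$93,943.00"
--     elif date == [2, 12, 2021] and "LEXUS ES250 2.5L F-SPORT" in str:
--        for i,part in enumerate(partsArr):
--           if '77,897.00' in part:
--             partsArr[i] = "$78,201.00"
--     elif date in [[15, 12, 2020], [22, 12, 2020], [31, 12, 2020]] and "AUDI A6" in str and "BLACK EDITION" in str: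
--        for i,part in enumerate(partsArr):
--           if '83,572.00' in part:
--              partsArr[i] = "$86,740.00"
--     return partsArr
-- ===== SOURCE B (Python) =====
-- # Dictionary keyed by the date tuple: one lookup picks the campaign (no branch ladder),
-- # the rewrite is a recursive function building the result list.
-- FIX = {
--     (24, 11, 2022): (("MERCEDES BENZ C300",), '939,433.00', "$93,943.00"),
--     (19, 1, 2023): (("MERCEDES BENZ C300",), '939,433.00', "$93,943.00"),
--     (2, 12, 2021): (("LEXUS ES250 2.5L F-SPORT",), '77,897.00', "$78,201.00"),
--     (15, 12, 2020): (("AUDI A6", "BLACK EDITION"), '83,572.00', "$86,740.00"),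
--     (22, 12, 2020): (("AUDI A6", "BLACK EDITION"), '83,572.00', "$86,740.00"),
--     (31, 12, 2020): (("AUDI A6", "BLACK EDITION"), '83,572.00', "$86,740.00"),
-- }
--
-- def fixBadCostData(partsArr, date):
--     rule = FIX.get(tuple(date))
--     if rule is None:
--         return partsArr
--     markers, bad, good = rule
--     joined = " ".join(partsArr)
--     if not all(m in joined for m in markers):
--         return partsArr
--     def rewrite(parts):
--         if not parts:
--             return []
--         head = good if bad in parts[0] else parts[0]
--         return [head] + rewrite(parts[1:])
--     return rewrite(partsArr)
-- ===== Notes on version B (the rewrite author's own statement) =====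
-- stated objective: simpler
-- what changed: The if/elif ladder scanning date lists becomes a single dictionary lookup keyed by the date tuple (valid because the campaigns' dates are disjoint), followed by a marker check and a recursive rewrite of the parts list instead of an index-mutating enumerate loop.
import Mathlib
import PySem

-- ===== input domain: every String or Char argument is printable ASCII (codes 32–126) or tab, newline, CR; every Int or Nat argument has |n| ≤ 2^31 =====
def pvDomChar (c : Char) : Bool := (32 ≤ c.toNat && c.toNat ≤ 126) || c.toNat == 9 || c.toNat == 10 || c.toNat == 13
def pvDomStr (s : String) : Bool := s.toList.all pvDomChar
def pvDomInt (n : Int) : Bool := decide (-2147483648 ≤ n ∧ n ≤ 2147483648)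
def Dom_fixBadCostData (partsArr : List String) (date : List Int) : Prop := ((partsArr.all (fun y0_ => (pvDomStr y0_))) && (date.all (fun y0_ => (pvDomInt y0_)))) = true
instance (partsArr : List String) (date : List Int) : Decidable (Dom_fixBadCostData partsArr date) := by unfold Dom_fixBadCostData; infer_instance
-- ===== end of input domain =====

-- B replaces the if/elif ladder by a dictionary lookup keyed by the date (the campaigns' dates
-- are disjoint) plus a recursive rewrite of the parts list; simpler.
-- A mutates partsArr in place; the equivalence proved here is about the return value only.
-- ===== PORT A =====
def fixBadCostData (partsArr : List String) (date : List Int) : List String :=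
  let s := PySem.Str.join " " partsArr
  if (([[24, 11, 2022], [19, 1, 2023]] : List (List Int)).contains date
      && PySem.Str.isIn "MERCEDES BENZ C300" s) then
    partsArr.map (fun part => if PySem.Str.isIn "939,433.00" part then "$93,943.00" else part)
  else if (date == ([2, 12, 2021] : List Int)
      && PySem.Str.isIn "LEXUS ES250 2.5L F-SPORT" s) then
    partsArr.map (fun part => if PySem.Str.isIn "77,897.00" part then "$78,201.00" else part)
  else if (([[15, 12, 2020], [22, 12, 2020], [31, 12, 2020]] : List (List Int)).contains date
      && PySem.Str.isIn "AUDI A6" s && PySem.Str.isIn "BLACK EDITION" s) then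
    partsArr.map (fun part => if PySem.Str.isIn "83,572.00" part then "$86,740.00" else part)
  else partsArr

-- ===== PORT B =====
-- FIX: date tuple ↦ (markers, bad substring, replacement)
def fbcFIX : PySem.Dict (List Int) (List String × String × String) :=
  PySem.Dict.mk
    [ ([24, 11, 2022], (["MERCEDES BENZ C300"], "939,433.00", "$93,943.00")),
      ([19, 1, 2023], (["MERCEDES BENZ C300"], "939,433.00", "$93,943.00")),
      ([2, 12, 2021], (["LEXUS ES250 2.5L F-SPORT"], "77,897.00", "$78,201.00")),
      ([15, 12, 2020], (["AUDI A6", "BLACK EDITION"], "83,572.00", "$86,740.00")),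
      ([22, 12, 2020], (["AUDI A6", "BLACK EDITION"], "83,572.00", "$86,740.00")),
      ([31, 12, 2020], (["AUDI A6", "BLACK EDITION"], "83,572.00", "$86,740.00")) ]

def fbcRewrite (bad good : String) : List String → List String
  | [] => []
  | p :: rest => (if PySem.Str.isIn bad p then good else p) :: fbcRewrite bad good rest

def fixBadCostData_alt (partsArr : List String) (date : List Int) : List String :=
  match fbcFIX.get? date with
  | none => partsArr
  | some (markers, bad, good) =>
    let joined := PySem.Str.join " " partsArr
    if !(markers.all (fun m => PySem.Str.isIn m joined)) then partsArr
    else fbcRewrite bad good partsArr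

-- ===== PRECONDITION & SPEC =====
def Spec_fixBadCostData (partsArr : List String) (date : List Int) (out : List String) : Prop := out = fixBadCostData_alt partsArr date
instance (partsArr : List String) (date : List Int) (out : List String) : Decidable (Spec_fixBadCostData partsArr date out) := by unfold Spec_fixBadCostData; infer_instance

-- ===== CLAIM =====
def Claim_equal_fixBadCostData : Prop := ∀ (partsArr : List String) (date : List Int), Dom_fixBadCostData partsArr date → Spec_fixBadCostData partsArr date (fixBadCostData partsArr date)

-- ===== LEMMAS AND PROOFS =====
theorem fbcRewrite_eq_map (bad good : String) (l : List String) :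
    fbcRewrite bad good l = l.map (fun p => if PySem.Str.isIn bad p then good else p) := by
  induction l with
  | nil => rfl
  | cons p rest ih => simp [fbcRewrite, ih]

-- ===== VERDICT =====
theorem fixBadCostData_spec : Claim_equal_fixBadCostData := by
  intro partsArr date _
  unfold Spec_fixBadCostData
  by_cases h1 : date = ([24, 11, 2022] : List Int)
  · subst h1
    simp only [fixBadCostData, fixBadCostData_alt, fbcFIX, fbcRewrite_eq_map]
    (simp [PySem.Dict.get?]; split_ifs <;> simp_all)
  by_cases h2 : date = ([19, 1, 2023] : List Int)
  · subst h2
    simp only [fixBadCostData, fixBadCostData_alt, fbcFIX, fbcRewrite_eq_map]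
    (simp [PySem.Dict.get?]; split_ifs <;> simp_all)
  by_cases h3 : date = ([2, 12, 2021] : List Int)
  · subst h3
    simp only [fixBadCostData, fixBadCostData_alt, fbcFIX, fbcRewrite_eq_map]
    (simp [PySem.Dict.get?]; split_ifs <;> simp_all)
  by_cases h4 : date = ([15, 12, 2020] : List Int)
  · subst h4
    simp only [fixBadCostData, fixBadCostData_alt, fbcFIX, fbcRewrite_eq_map]
    (simp [PySem.Dict.get?]; split_ifs <;> simp_all)
  by_cases h5 : date = ([22, 12, 2020] : List Int)
  · subst h5
    simp only [fixBadCostData, fixBadCostData_alt, fbcFIX, fbcRewrite_eq_map]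
    (simp [PySem.Dict.get?]; split_ifs <;> simp_all)
  by_cases h6 : date = ([31, 12, 2020] : List Int)
  · subst h6
    simp only [fixBadCostData, fixBadCostData_alt, fbcFIX, fbcRewrite_eq_map]
    (simp [PySem.Dict.get?]; split_ifs <;> simp_all)
  have e1 : (([24, 11, 2022] : List Int) == date) = false := beq_eq_false_iff_ne.mpr (fun e => h1 e.symm)
  have e2 : (([19, 1, 2023] : List Int) == date) = false := beq_eq_false_iff_ne.mpr (fun e => h2 e.symm)
  have e3 : (([2, 12, 2021] : List Int) == date) = false := beq_eq_false_iff_ne.mpr (fun e => h3 e.symm)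
  have e4 : (([15, 12, 2020] : List Int) == date) = false := beq_eq_false_iff_ne.mpr (fun e => h4 e.symm)
  have e5 : (([22, 12, 2020] : List Int) == date) = false := beq_eq_false_iff_ne.mpr (fun e => h5 e.symm)
  have e6 : (([31, 12, 2020] : List Int) == date) = false := beq_eq_false_iff_ne.mpr (fun e => h6 e.symm)
  simp [fixBadCostData, fixBadCostData_alt, fbcFIX, PySem.Dict.get?, e1, e2, e3, e4, e5, e6,
    h1, h2, h3, h4, h5, h6]
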